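-- pv_equiv track=rewrite | github.com/khandudaddupo/sikandarninja | ranew.py | is_sms_like
-- ===== SOURCE A (Python) =====
-- def is_sms_like(obj):
--     if not isinstance(obj, dict):
--         return False
--     keys = {k.lower() for k in obj.keys()}
--     score = 0
--     if keys & {"message", "msg", "body", "text", "sms"}:
--         score += 2
--     if keys & {"from", "sender", "address", "source", "number"}:
--         score += 2
--     if keys & {"time", "timestamp", "ts", "date", "created_at"}:
--         score += 1
--     if keys & {"device", "deviceid", "imei", "device_id", "phoneid"}:
--         score += 1
--     return score >= 3
-- ===== SOURCE B (Python) =====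
-- _KEYWORD_INDEX = {
--     "message": (0, 2), "msg": (0, 2), "body": (0, 2), "text": (0, 2), "sms": (0, 2),
--     "from": (1, 2), "sender": (1, 2), "address": (1, 2), "source": (1, 2), "number": (1, 2),
--     "time": (2, 1), "timestamp": (2, 1), "ts": (2, 1), "date": (2, 1), "created_at": (2, 1),
--     "device": (3, 1), "deviceid": (3, 1), "imei": (3, 1), "device_id": (3, 1), "phoneid": (3, 1),
-- }
--
-- def is_sms_like(obj):
--     if not isinstance(obj, dict):
--         return False
--     seen = set()
--     for k in obj.keys():
--         hit = _KEYWORD_INDEX.get(k.lower())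
--         if hit is not None:
--             seen.add(hit)
--     return sum(w for _, w in seen) >= 3
-- ===== Notes on version B (the rewrite author's own statement) =====
-- stated objective: alternative
-- what changed: Replaces A's four lowered-key-set intersections against separate keyword sets by a single keyword->(category, weight) index consulted once per key, collecting the distinct (category, weight) entries hit in a set and comparing their weight sum to 3.
import Mathlib
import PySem

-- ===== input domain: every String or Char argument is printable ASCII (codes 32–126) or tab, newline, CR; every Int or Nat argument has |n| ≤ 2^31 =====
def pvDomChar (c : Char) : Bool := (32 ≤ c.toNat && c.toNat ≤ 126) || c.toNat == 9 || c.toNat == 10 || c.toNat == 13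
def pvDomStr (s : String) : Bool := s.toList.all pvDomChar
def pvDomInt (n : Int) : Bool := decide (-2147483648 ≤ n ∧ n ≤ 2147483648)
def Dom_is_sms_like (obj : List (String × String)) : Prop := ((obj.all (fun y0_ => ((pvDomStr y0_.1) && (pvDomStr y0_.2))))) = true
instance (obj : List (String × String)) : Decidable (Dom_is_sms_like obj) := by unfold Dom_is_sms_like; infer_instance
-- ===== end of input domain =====

-- B replaces A's four separate keyword-set intersections by one keyword→(category, weight) index
-- consulted once per key, summing the weights of the distinct categories hit (objective: alternative).

-- ===== PORT A =====
-- A's four keyword-set literals, named for readability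
def pvW0 : List String := ["message", "msg", "body", "text", "sms"]
def pvW1 : List String := ["from", "sender", "address", "source", "number"]
def pvW2 : List String := ["time", "timestamp", "ts", "date", "created_at"]
def pvW3 : List String := ["device", "deviceid", "imei", "device_id", "phoneid"]

def is_sms_like (obj : List (String × String)) : Bool :=
  let keys : PySem.Set String := PySem.Set.ofList (((PySem.Dict.mk obj).keys).map PySem.Str.lower)
  let score : Int := 0
  let score := if !(PySem.Set.inter keys pvW0).isEmpty then score + 2 else score
  let score := if !(PySem.Set.inter keys pvW1).isEmpty then score + 2 else score
  let score := if !(PySem.Set.inter keys pvW2).isEmpty then score + 1 else score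
  let score := if !(PySem.Set.inter keys pvW3).isEmpty then score + 1 else score
  decide (score ≥ 3)

-- ===== PORT B =====
-- the literal dict _KEYWORD_INDEX of Source B (distinct keys, insertion order)
def pvKeywordIndex : PySem.Dict String (Int × Int) := PySem.Dict.mk
  [("message", (0, 2)), ("msg", (0, 2)), ("body", (0, 2)), ("text", (0, 2)), ("sms", (0, 2)),
   ("from", (1, 2)), ("sender", (1, 2)), ("address", (1, 2)), ("source", (1, 2)), ("number", (1, 2)),
   ("time", (2, 1)), ("timestamp", (2, 1)), ("ts", (2, 1)), ("date", (2, 1)), ("created_at", (2, 1)),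
   ("device", (3, 1)), ("deviceid", (3, 1)), ("imei", (3, 1)), ("device_id", (3, 1)), ("phoneid", (3, 1))]

def is_sms_like_alt (obj : List (String × String)) : Bool :=
  let seen : PySem.Set (Int × Int) :=
    obj.foldl (fun s p =>
      match pvKeywordIndex.get? (PySem.Str.lower p.1) with
      | some hit => PySem.Set.add s hit
      | none => s) PySem.Set.empty
  decide ((seen.map (fun c => c.2)).sum ≥ 3)

-- ===== PRECONDITION & SPEC =====
def Spec_is_sms_like (obj : List (String × String)) (out : Bool) : Prop := out = is_sms_like_alt obj
instance (obj : List (String × String)) (out : Bool) : Decidable (Spec_is_sms_like obj out) := by unfold Spec_is_sms_like; infer_instance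

-- ===== CLAIM (what is proved, stated in full; the proofs are below) =====
def Claim_equal_is_sms_like : Prop := ∀ (obj : List (String × String)), Dom_is_sms_like obj → Spec_is_sms_like obj (is_sms_like obj)

-- ===== LEMMAS AND PROOFS =====

-- "the dict has a key whose lowercase is in W"
def pvHits (obj : List (String × String)) (W : List String) : Bool :=
  obj.any (fun p => decide (PySem.Str.lower p.1 ∈ W))

theorem pvHits_iff (obj : List (String × String)) (W : List String) :
    pvHits obj W = true ↔ ∃ p ∈ obj, PySem.Str.lower p.1 ∈ W := by
  simp [pvHits]

-- the keyword index, characterised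
set_option maxHeartbeats 1000000 in
theorem pv_get_index (k : String) : pvKeywordIndex.get? k =
    if k ∈ pvW0 then some (0, 2) else if k ∈ pvW1 then some (1, 2)
    else if k ∈ pvW2 then some (2, 1) else if k ∈ pvW3 then some (3, 1) else none := by
  simp only [pvKeywordIndex, PySem.Dict.get?_mk_cons, pvW0, pvW1, pvW2, pvW3,
    List.mem_cons, List.not_mem_nil, or_false, beq_iff_eq]
  by_cases h0 : k = "message"
  · simp [h0]
  by_cases h1 : k = "msg"
  · simp [h1]
  by_cases h2 : k = "body"
  · simp [h2]
  by_cases h3 : k = "text"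
  · simp [h3]
  by_cases h4 : k = "sms"
  · simp [h4]
  by_cases h5 : k = "from"
  · simp [h5]
  by_cases h6 : k = "sender"
  · simp [h6]
  by_cases h7 : k = "address"
  · simp [h7]
  by_cases h8 : k = "source"
  · simp [h8]
  by_cases h9 : k = "number"
  · simp [h9]
  by_cases h10 : k = "time"
  · simp [h10]
  by_cases h11 : k = "timestamp"
  · simp [h11]
  by_cases h12 : k = "ts"
  · simp [h12]
  by_cases h13 : k = "date"
  · simp [h13]
  by_cases h14 : k = "created_at"
  · simp [h14]
  by_cases h15 : k = "device"
  · simp [h15]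
  by_cases h16 : k = "deviceid"
  · simp [h16]
  by_cases h17 : k = "imei"
  · simp [h17]
  by_cases h18 : k = "device_id"
  · simp [h18]
  by_cases h19 : k = "phoneid"
  · simp [h19]
  simp [eq_comm, PySem.Dict.get?, h0,h1,h2,h3,h4,h5,h6,h7,h8,h9,h10,h11,h12,h13,h14,h15,h16,h17,h18,h19]

theorem pv_hit0 (k : String) : pvKeywordIndex.get? k = some ((0 : Int), (2 : Int)) ↔ k ∈ pvW0 := by
  constructor
  · intro h; by_contra hn; rw [pv_get_index] at h; split_ifs at h <;> simp_all
  · intro h; fin_cases h <;> decide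

theorem pv_hit1 (k : String) : pvKeywordIndex.get? k = some ((1 : Int), (2 : Int)) ↔ k ∈ pvW1 := by
  constructor
  · intro h; by_contra hn; rw [pv_get_index] at h; split_ifs at h <;> simp_all
  · intro h; fin_cases h <;> decide

theorem pv_hit2 (k : String) : pvKeywordIndex.get? k = some ((2 : Int), (1 : Int)) ↔ k ∈ pvW2 := by
  constructor
  · intro h; by_contra hn; rw [pv_get_index] at h; split_ifs at h <;> simp_all
  · intro h; fin_cases h <;> decide

theorem pv_hit3 (k : String) : pvKeywordIndex.get? k = some ((3 : Int), (1 : Int)) ↔ k ∈ pvW3 := by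
  constructor
  · intro h; by_contra hn; rw [pv_get_index] at h; split_ifs at h <;> simp_all
  · intro h; fin_cases h <;> decide

theorem pv_hit_shape (k : String) (x : Int × Int) (h : pvKeywordIndex.get? k = some x) :
    x = ((0 : Int), (2 : Int)) ∨ x = ((1 : Int), (2 : Int)) ∨ x = ((2 : Int), (1 : Int)) ∨ x = ((3 : Int), (1 : Int)) := by
  rw [pv_get_index] at h; split_ifs at h <;> simp_all

-- B's loop, characterised: membership …
theorem pv_mem_fold (l : List (String × String)) (s : PySem.Set (Int × Int)) (x : Int × Int) :
    x ∈ l.foldl (fun s p =>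
      match pvKeywordIndex.get? (PySem.Str.lower p.1) with
      | some hit => PySem.Set.add s hit
      | none => s) s ↔
    x ∈ s ∨ ∃ p ∈ l, pvKeywordIndex.get? (PySem.Str.lower p.1) = some x := by
  induction l generalizing s with
  | nil => simp
  | cons a t ih =>
    simp only [List.foldl_cons, List.mem_cons]
    cases h : pvKeywordIndex.get? (PySem.Str.lower a.1) with
    | none => simp [h, ih]
    | some hit =>
      simp only [ih, PySem.Set.mem_add]
      constructor
      · rintro ((hs | rfl) | ⟨p, hp, hq⟩)
        · exact Or.inl hs
        · exact Or.inr ⟨a, Or.inl rfl, h⟩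
        · exact Or.inr ⟨p, Or.inr hp, hq⟩
      · rintro (hs | ⟨p, (rfl | hp), hq⟩)
        · exact Or.inl (Or.inl hs)
        · rw [h] at hq; exact Or.inl (Or.inr (Option.some.inj hq).symm)
        · exact Or.inr ⟨p, hp, hq⟩

-- … and distinctness
theorem pv_nodup_fold (l : List (String × String)) (s : PySem.Set (Int × Int)) (hs : s.Nodup) :
    (l.foldl (fun s p =>
      match pvKeywordIndex.get? (PySem.Str.lower p.1) with
      | some hit => PySem.Set.add s hit
      | none => s) s).Nodup := by
  induction l generalizing s with
  | nil => exact hs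
  | cons a t ih =>
    simp only [List.foldl_cons]
    cases h : pvKeywordIndex.get? (PySem.Str.lower a.1) with
    | none => exact ih s hs
    | some hit => exact ih _ (PySem.Set.nodup_add _ _ hs)

-- the weight sum of a distinct list of index entries
theorem pv_sum_nodup (l : List (Int × Int)) (hnd : l.Nodup)
    (hsub : ∀ x ∈ l, x = ((0 : Int), (2 : Int)) ∨ x = ((1 : Int), (2 : Int)) ∨ x = ((2 : Int), (1 : Int)) ∨ x = ((3 : Int), (1 : Int))) :
    (l.map (fun c => c.2)).sum =
      (if ((0 : Int), (2 : Int)) ∈ l then 2 else 0) + (if ((1 : Int), (2 : Int)) ∈ l then 2 else 0)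
      + (if ((2 : Int), (1 : Int)) ∈ l then 1 else 0) + (if ((3 : Int), (1 : Int)) ∈ l then 1 else 0) := by
  induction l with
  | nil => simp
  | cons a t ih =>
    rcases List.nodup_cons.mp hnd with ⟨hna, hnt⟩
    have ht := ih hnt (fun x hx => hsub x (List.mem_cons_of_mem a hx))
    have ha := hsub a (List.mem_cons_self ..)
    rcases ha with rfl | rfl | rfl | rfl <;>
      simp only [List.map_cons, List.sum_cons, ht, List.mem_cons] <;>
      · rw [if_neg hna] at ht ⊢; simp_all; omega

-- A's truthiness test 'keys & W', characterised
theorem pv_inter_test (obj : List (String × String)) (W : List String) :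
    (!(PySem.Set.inter (PySem.Set.ofList (((PySem.Dict.mk obj).keys).map PySem.Str.lower)) W).isEmpty)
      = pvHits obj W := by
  rw [Bool.eq_iff_iff, Bool.not_eq_true',
    List.isEmpty_eq_false_iff_exists_mem, pvHits_iff]
  constructor
  · rintro ⟨x, hx⟩
    rw [PySem.Set.mem_inter, PySem.Set.mem_ofList] at hx
    rcases hx with ⟨hx1, hx2⟩
    rcases List.mem_map.mp hx1 with ⟨k, hk, rfl⟩
    rw [PySem.Dict.keys_mk] at hk
    rcases List.mem_map.mp hk with ⟨p, hp, rfl⟩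
    exact ⟨p, hp, hx2⟩
  · rintro ⟨p, hp, hw⟩
    refine ⟨PySem.Str.lower p.1, ?_⟩
    rw [PySem.Set.mem_inter, PySem.Set.mem_ofList]
    refine ⟨List.mem_map_of_mem ?_, hw⟩
    rw [PySem.Dict.keys_mk]
    exact List.mem_map_of_mem hp

-- both programs compute decide (2·[hits W0] + 2·[hits W1] + [hits W2] + [hits W3] ≥ 3)
theorem pv_a_char (obj : List (String × String)) :
    is_sms_like obj = decide ((((if pvHits obj pvW0 then (2 : Int) else 0) + (if pvHits obj pvW1 then 2 else 0))
      + (if pvHits obj pvW2 then 1 else 0)) + (if pvHits obj pvW3 then 1 else 0) ≥ 3) := by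
  simp only [is_sms_like]
  rw [pv_inter_test obj pvW0, pv_inter_test obj pvW1, pv_inter_test obj pvW2, pv_inter_test obj pvW3]
  cases h0 : pvHits obj pvW0 <;> cases h1 : pvHits obj pvW1 <;>
    cases h2 : pvHits obj pvW2 <;> cases h3 : pvHits obj pvW3 <;>
    simp [*]

theorem pv_b_char (obj : List (String × String)) :
    is_sms_like_alt obj = decide ((((if pvHits obj pvW0 then (2 : Int) else 0) + (if pvHits obj pvW1 then 2 else 0))
      + (if pvHits obj pvW2 then 1 else 0)) + (if pvHits obj pvW3 then 1 else 0) ≥ 3) := by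
  simp only [is_sms_like_alt]
  have hnd := pv_nodup_fold obj PySem.Set.empty (by simp [PySem.Set.empty])
  have hsub : ∀ x ∈ obj.foldl (fun s p =>
      match pvKeywordIndex.get? (PySem.Str.lower p.1) with
      | some hit => PySem.Set.add s hit
      | none => s) PySem.Set.empty,
      x = ((0 : Int), (2 : Int)) ∨ x = ((1 : Int), (2 : Int)) ∨ x = ((2 : Int), (1 : Int)) ∨ x = ((3 : Int), (1 : Int)) := by
    intro x hx
    rcases (pv_mem_fold obj PySem.Set.empty x).mp hx with h | ⟨p, _, hq⟩
    · simp [PySem.Set.empty] at h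
    · exact pv_hit_shape _ _ hq
  rw [pv_sum_nodup _ hnd hsub]
  have e : ∀ (x : Int × Int) (W : List String),
      (∀ k, pvKeywordIndex.get? k = some x ↔ k ∈ W) →
      ((x ∈ obj.foldl (fun s p =>
        match pvKeywordIndex.get? (PySem.Str.lower p.1) with
        | some hit => PySem.Set.add s hit
        | none => s) PySem.Set.empty) ↔ pvHits obj W = true) := by
    intro x W hiff
    rw [pv_mem_fold, pvHits_iff]
    simp only [PySem.Set.empty, List.not_mem_nil, false_or]
    constructor
    · rintro ⟨p, hp, hq⟩; exact ⟨p, hp, (hiff _).mp hq⟩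
    · rintro ⟨p, hp, hq⟩; exact ⟨p, hp, (hiff _).mpr hq⟩
  rw [if_congr (e _ _ pv_hit0) rfl rfl, if_congr (e _ _ pv_hit1) rfl rfl,
      if_congr (e _ _ pv_hit2) rfl rfl, if_congr (e _ _ pv_hit3) rfl rfl]

-- ===== VERDICT (by name: the statement is the Claim_ definition above) =====
theorem is_sms_like_spec : Claim_equal_is_sms_like := by
  intro obj _
  unfold Spec_is_sms_like
  rw [pv_a_char, pv_b_char]
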